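-- pv_equiv track=rewrite | github.com/lcbathtissue/MoralAI | radius_scanner.py | observation_matrix
-- ===== SOURCE A (Python) =====
-- import math, random
--
-- def observation_matrix(grid, radius, center_x, center_y):
--
--     # define the observable space around the agent,
--     # 'X' out of range, 'A' is agent at centre, '0' is reachable cell in radius
--     center = radius
--     matrix = [[0.0 for x in range(2*radius+1)] for y in range(2*radius+1)]
--
--     for i in range(2*radius+1):
--         # perform distance calculations
--         for j in range(2*radius+1):
--             dist = math.sqrt((i-center)**2 + (j-center)**2)
--             matrix[i][j] = round(dist, 2)
--
--     for i in range(len(matrix)):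
--         # exclude any cells out of radius threshold
--         for j in range(len(matrix[0])):
--             if matrix[i][j] > radius:
--                 matrix[i][j] = 'X'
--             else:
--                 matrix[i][j] = '0'
--
--     center_row = len(matrix) // 2
--     center_col = len(matrix[0]) // 2
--     matrix[center_row][center_col] = 'A'
--
--     # translate the observable space into relative
--     # coordinates based off agent position
--     coords = []
--     num_rows, num_cols = len(matrix), len(matrix[0])
--     offset_x, offset_y = center_x - (num_rows // 2), center_y - (num_cols // 2)
--     for i in range(num_rows):
--         row = []
--         for j in range(num_cols):
--             if matrix[i][j] == '0':
--                 row.append([j + offset_y, i + offset_x])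
--             elif matrix[i][j] == 'A' or matrix[i][j] == 'X':
--                 row.append(matrix[i][j])
--         coords.append(row)
--
--     # using the matrix of relative coordinates and the values
--     # in the grid parameter, replace observable cells with
--     # the values found in grid, excluding cells outside of
--     # the border of the grid which also will become 'X'
--     num_rows, num_cols = len(grid), len(grid[0])
--     values_matrix = [['X' for j in range(len(coords[0]))] for i in range(len(coords))]
--     for i in range(len(coords)):
--         for j in range(len(coords[0])):
--             if coords[i][j] == 'A' or coords[i][j] == 'X':
--                 values_matrix[i][j] = coords[i][j]
--             else:
--                 x, y = coords[i][j]
--                 if x < 0 or x >= num_cols or y < 0 or y >= num_rows: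
--                     values_matrix[i][j] = 'X'
--                 else:
--                     values_matrix[i][j] = grid[y][x]
--     return values_matrix
-- ===== SOURCE B (Python) =====
-- import math
--
-- def observation_matrix(grid, radius, center_x, center_y):
--     # single pass: classify each window cell directly instead of four staged matrices
--     num_rows, num_cols = len(grid), len(grid[0])
--     size = 2 * radius + 1
--     offset_x = center_x - radius
--     offset_y = center_y - radius
--     result = []
--     for i in range(size):
--         row = []
--         for j in range(size):
--             if i == radius and j == radius:
--                 row.append('A')
--             elif round(math.sqrt((i - radius) ** 2 + (j - radius) ** 2), 2) > radius:
--                 row.append('X')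
--             else:
--                 x, y = j + offset_y, i + offset_x
--                 if x < 0 or x >= num_cols or y < 0 or y >= num_rows:
--                     row.append('X')
--                 else:
--                     row.append(grid[y][x])
--         result.append(row)
--     return result
-- ===== Notes on version B (the rewrite author's own statement) =====
-- stated objective: simpler
-- what changed: Replaces A's four staged full-matrix passes (float distance matrix, threshold relabelling, relative-coordinate matrix, grid lookup) with a single double loop that classifies each window cell directly (agent / out-of-radius / grid value or border).
-- outside the precondition, e.g. on observation_matrix([['a', 'b'], ['c']], 0, 0, 0): A returns [['A']], B returns [['A']]
import Mathlib
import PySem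

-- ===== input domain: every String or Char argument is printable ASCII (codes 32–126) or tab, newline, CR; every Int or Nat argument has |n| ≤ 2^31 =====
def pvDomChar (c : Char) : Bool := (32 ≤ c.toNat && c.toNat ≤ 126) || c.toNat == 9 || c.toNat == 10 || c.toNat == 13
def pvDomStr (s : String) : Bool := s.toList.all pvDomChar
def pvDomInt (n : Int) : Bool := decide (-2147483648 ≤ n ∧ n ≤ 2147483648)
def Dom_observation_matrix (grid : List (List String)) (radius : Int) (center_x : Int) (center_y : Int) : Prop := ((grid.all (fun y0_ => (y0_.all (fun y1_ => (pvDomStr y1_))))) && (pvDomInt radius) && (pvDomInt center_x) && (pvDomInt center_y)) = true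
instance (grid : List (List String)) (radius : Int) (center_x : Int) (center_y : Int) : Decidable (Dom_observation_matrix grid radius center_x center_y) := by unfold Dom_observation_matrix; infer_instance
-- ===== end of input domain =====

-- B replaces A's four staged full-matrix passes by one double loop classifying each window cell directly (simpler decomposition; same return value).


-- Round-half-even of p / 2^shift (used by both float-rounding steps below; exact integers only).
def pyRHE (p : Nat) (shift : Nat) : Nat :=
  let q := p / 2 ^ shift
  let rem := p % 2 ^ shift
  let half := 2 ^ shift / 2
  if half < rem then q + 1 else if rem < half then q else if q % 2 = 0 then q else q + 1

-- Hand-ported exact integer model of the Python float expression round(math.sqrt(d2), 2), scaled by 100: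
-- (1) int → float conversion rounds d2 to 53 significant bits (half-even);
-- (2) math.sqrt is the correctly rounded IEEE-754 square root (a tie is impossible for an
--     integer radicand of this size, so nearest-integer on the 2^shift-scaled value is exact);
-- (3) round(·, 2) is the correctly rounded 2-decimal value, i.e. half-even rounding of 100·s.
-- Exact for 0 ≤ d2 < 2^104, which covers every distance the Dom-bounded inputs can produce;
-- cross-checked against CPython exhaustively on small inputs and randomly up to 2^63.
def pyRoundSqrt100 (d2 : Int) : Int :=
  let m0 := d2.toNat
  if m0 = 0 then 0 else
    let bl := Nat.log2 m0 + 1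
    let m := if 53 < bl then pyRHE m0 (bl - 53) * 2 ^ (bl - 53) else m0
    let e := Nat.log2 m / 2
    let shift := 52 - e
    let N := m * 4 ^ shift
    let a := Nat.sqrt N
    let n := if a * (a + 1) < N then a + 1 else a
    ((pyRHE (100 * n) shift : Nat) : Int)

-- cell payload of A's third stage: a relative-coordinate pair [x, y] or the tag 'A'/'X'
inductive PCell where
  | pair : Int → Int → PCell
  | tag : String → PCell
deriving DecidableEq, Repr

-- ===== PORT A =====
-- One def per successive Python statement block, each taking the previous stage's value (Python's
-- local variables); A's float matrix entries round(dist, 2) are modelled exactly as 100×-scaled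
-- integers (pyRoundSqrt100), so `matrix[i][j] > radius` becomes `100*radius < v`.

-- matrix = [[...]] then the first loop pair: round(sqrt((i-center)^2+(j-center)^2), 2)
def omA_matrix (radius : Int) : List (List Int) :=
  (PySem.List.pyRange 0 (2 * radius + 1) 1).map (fun i =>
    (PySem.List.pyRange 0 (2 * radius + 1) 1).map (fun j =>
      pyRoundSqrt100 ((i - radius) ^ 2 + (j - radius) ^ 2)))

-- second loop pair: relabel each cell 'X' / '0' by the radius threshold
def omA_cells (radius : Int) (matrix : List (List Int)) : List (List String) :=
  (PySem.List.pyRange 0 (matrix.length : Int) 1).map (fun i =>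
    (PySem.List.pyRange 0 ((matrix.headD []).length : Int) 1).map (fun j =>
      if 100 * radius < PySem.List.pyGetD (PySem.List.pyGetD matrix i []) j 0 then "X" else "0"))

-- matrix[center_row][center_col] = 'A'
def omA_center (cells : List (List String)) : List (List String) :=
  cells.modify (PySem.Int.floordiv (cells.length : Int) 2).toNat
    (fun row => row.set (PySem.Int.floordiv ((cells.headD []).length : Int) 2).toNat "A")

-- third loop pair: relative coordinates (row built by conditional appends, as in Python)
def omA_coords (center_x : Int) (center_y : Int) (cells2 : List (List String)) : List (List PCell) :=
  let num_rows1 : Int := (cells2.length : Int)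
  let num_cols1 : Int := ((cells2.headD []).length : Int)
  let offset_x := center_x - PySem.Int.floordiv num_rows1 2
  let offset_y := center_y - PySem.Int.floordiv num_cols1 2
  (PySem.List.pyRange 0 num_rows1 1).map (fun i =>
    (PySem.List.pyRange 0 num_cols1 1).foldl (fun row j =>
      let v := PySem.List.pyGetD (PySem.List.pyGetD cells2 i []) j ""
      if v = "0" then row ++ [PCell.pair (j + offset_y) (i + offset_x)]
      else if v = "A" ∨ v = "X" then row ++ [PCell.tag v] else row) [])

-- fourth loop pair: look the coordinates up in grid ('X' outside its border)
def omA_values (grid : List (List String)) (coords : List (List PCell)) : List (List String) :=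
  let num_rows : Int := (grid.length : Int)
  let num_cols : Int := ((grid.headD []).length : Int)   -- grid[0]: raises on empty grid in Python; Pre_ excludes
  (PySem.List.pyRange 0 (coords.length : Int) 1).map (fun i =>
    (PySem.List.pyRange 0 ((coords.headD []).length : Int) 1).map (fun j =>
      match PySem.List.pyGetD (PySem.List.pyGetD coords i []) j (PCell.tag "X") with
      | PCell.tag s => s
      | PCell.pair x y =>
        if x < 0 ∨ num_cols ≤ x ∨ y < 0 ∨ num_rows ≤ y then "X"
        else PySem.List.pyGetD (PySem.List.pyGetD grid y []) x ""))

def observation_matrix (grid : List (List String)) (radius : Int) (center_x : Int) (center_y : Int) : List (List String) :=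
  let matrix := omA_matrix radius
  let cells := omA_cells radius matrix
  let cells2 := omA_center cells
  let coords := omA_coords center_x center_y cells2
  omA_values grid coords

-- ===== PORT B =====
def observation_matrix_alt (grid : List (List String)) (radius : Int) (center_x : Int) (center_y : Int) : List (List String) :=
  let num_rows : Int := (grid.length : Int)
  let num_cols : Int := ((grid.headD []).length : Int)   -- grid[0]: raises on empty grid in Python; Pre_ excludes
  let size := 2 * radius + 1
  let offset_x := center_x - radius
  let offset_y := center_y - radius
  (PySem.List.pyRange 0 size 1).map (fun i =>
    (PySem.List.pyRange 0 size 1).map (fun j =>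
      if i = radius ∧ j = radius then "A"
      else if 100 * radius < pyRoundSqrt100 ((i - radius) ^ 2 + (j - radius) ^ 2) then "X"
      else
        let x := j + offset_y
        let y := i + offset_x
        if x < 0 ∨ num_cols ≤ x ∨ y < 0 ∨ num_rows ≤ y then "X"
        else PySem.List.pyGetD (PySem.List.pyGetD grid y []) x ""))

-- ===== PRECONDITION & SPEC =====
-- Pre_ excludes exactly where Python A raises IndexError: radius < 0 or grid == [] (len() chain on
-- an empty first row), and grids having a row shorter than row 0 (grid[y][x] can raise there).  The
-- last clause is slightly wider than A's raising set: a short row lying outside the observed window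
-- is never accessed, so A returns normally there (see the cite in the claim).
def Pre_observation_matrix (grid : List (List String)) (radius : Int) (center_x : Int) (center_y : Int) : Prop :=
  0 ≤ radius ∧ grid ≠ [] ∧ ∀ row ∈ grid, (grid.headD []).length ≤ row.length
instance (grid : List (List String)) (radius : Int) (center_x : Int) (center_y : Int) : Decidable (Pre_observation_matrix grid radius center_x center_y) := by unfold Pre_observation_matrix; infer_instance

def pvWitness_observation_matrix : List (List String) × Int × Int × Int := ([["a", "b"], ["c", "d"]], 1, 0, 0)

def Spec_observation_matrix (grid : List (List String)) (radius : Int) (center_x : Int) (center_y : Int) (out : List (List String)) : Prop := out = observation_matrix_alt grid radius center_x center_y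
instance (grid : List (List String)) (radius : Int) (center_x : Int) (center_y : Int) (out : List (List String)) : Decidable (Spec_observation_matrix grid radius center_x center_y out) := by unfold Spec_observation_matrix; infer_instance

-- ===== CLAIM (what is proved, stated in full; the proofs are below) =====
def Claim_equal_observation_matrix : Prop := ∀ (grid : List (List String)) (radius : Int) (center_x : Int) (center_y : Int), Dom_observation_matrix grid radius center_x center_y → Pre_observation_matrix grid radius center_x center_y → Spec_observation_matrix grid radius center_x center_y (observation_matrix grid radius center_x center_y)
-- ===== LEMMAS AND PROOFS =====

-- the (2r+1) × (2r+1) window as a double map (normal form of every A stage)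
def pvMap2 {α : Type} (radius : Int) (f : Int → Int → α) : List (List α) :=
  (PySem.List.pyRange 0 (2 * radius + 1) 1).map (fun i =>
    (PySem.List.pyRange 0 (2 * radius + 1) 1).map (f i))
-- the scaled rounded distance of A's first stage
def pvK (radius i j : Int) : Int := pyRoundSqrt100 ((i - radius) ^ 2 + (j - radius) ^ 2)
-- the cell label after A's threshold pass
def pvC (radius i j : Int) : String := if 100 * radius < pvK radius i j then "X" else "0"
-- the label after the centre overwrite
def pvC2 (radius i j : Int) : String := if i = radius ∧ j = radius then "A" else pvC radius i j
-- the coordinate/tag cell of A's third stage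
def pvP (radius center_x center_y i j : Int) : PCell :=
  if pvC2 radius i j = "0" then PCell.pair (j + (center_y - radius)) (i + (center_x - radius))
  else PCell.tag (pvC2 radius i j)

lemma pv_get2 {α : Type} (f : Int → Int → α) (n i j : Int) (d : List α) (d2 : α)
    (hi0 : 0 ≤ i) (hin : i < n) (hj0 : 0 ≤ j) (hjn : j < n) :
    PySem.List.pyGetD (PySem.List.pyGetD ((PySem.List.pyRange 0 n 1).map
      (fun i => (PySem.List.pyRange 0 n 1).map (f i))) i d) j d2 = f i j := by
  rw [PySem.List.pyGetD_map_pyRange_of_nonneg _ n i d hi0 hin,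
      PySem.List.pyGetD_map_pyRange_of_nonneg _ n j d2 hj0 hjn]

lemma pv_head_map {α : Type} (f : Int → α) (n : Int) (h : 0 < n) (d : α) :
    ((PySem.List.pyRange 0 n 1).map f).headD d = f 0 := by
  rw [PySem.List.pyRange_one_cons h]; rfl

lemma pv_modify_map2 {α : Type} (f : Int → Int → α) (n r : Int) (h0 : 0 ≤ r) (v : α) :
    (((PySem.List.pyRange 0 n 1).map (fun i => (PySem.List.pyRange 0 n 1).map (f i))).modify
        r.toNat (fun row => row.set r.toNat v))
      = (PySem.List.pyRange 0 n 1).map (fun i => (PySem.List.pyRange 0 n 1).map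
          (fun j => if i = r ∧ j = r then v else f i j)) := by
  apply List.ext_getElem
  · simp
  · intro k h1 h2
    simp only [List.length_modify, List.length_map, PySem.List.length_pyRange_one] at h1
    rw [List.getElem_modify]
    simp only [List.getElem_map, PySem.List.getElem_pyRange_one, zero_add]
    by_cases hk : r.toNat = k
    · have hkr : (k : Int) = r := by omega
      simp only [if_pos hk, hkr]
      apply List.ext_getElem
      · simp
      · intro l h3 h4
        simp only [List.length_set, List.length_map, PySem.List.length_pyRange_one] at h3
        rw [List.getElem_set]
        simp only [List.getElem_map, PySem.List.getElem_pyRange_one, zero_add]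
        by_cases hl : r.toNat = l
        · have : (l : Int) = r := by omega
          simp [hl, this]
        · have : ¬ ((l : Int) = r) := by omega
          simp [hl, this]
    · have hkr : ¬ ((k : Int) = r) := by omega
      simp [hk, hkr]

lemma pv_len_cast (radius : Int) (hr : 0 ≤ radius) :
    (((2 * radius + 1 - 0).toNat : Int)) = 2 * radius + 1 := by omega

lemma pv_cells_eq (radius : Int) (hr : 0 ≤ radius) :
    omA_cells radius (omA_matrix radius) = pvMap2 radius (pvC radius) := by
  have hn : (0:Int) < 2 * radius + 1 := by omega
  unfold omA_cells omA_matrix pvMap2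
  simp only [List.length_map, PySem.List.length_pyRange_one,
    pv_head_map _ _ hn, List.length_map, PySem.List.length_pyRange_one, pv_len_cast radius hr]
  apply List.map_congr_left
  intro i hi
  rw [PySem.List.mem_pyRange_one] at hi
  apply List.map_congr_left
  intro j hj
  rw [PySem.List.mem_pyRange_one] at hj
  rw [pv_get2 (fun i j => pyRoundSqrt100 ((i - radius) ^ 2 + (j - radius) ^ 2)) _ i j _ _
      hi.1 hi.2 hj.1 hj.2]
  rfl

lemma pv_cells2_eq (radius : Int) (hr : 0 ≤ radius) :
    omA_center (pvMap2 radius (pvC radius)) = pvMap2 radius (pvC2 radius) := by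
  have hn : (0:Int) < 2 * radius + 1 := by omega
  have hfd : PySem.Int.floordiv (2 * radius + 1) 2 = radius := by
    rw [PySem.Int.floordiv_eq_ediv_of_pos (by omega)]; omega
  unfold omA_center pvMap2
  simp only [List.length_map, PySem.List.length_pyRange_one,
    pv_head_map _ _ hn, List.length_map, PySem.List.length_pyRange_one, pv_len_cast radius hr, hfd]
  rw [pv_modify_map2 _ _ radius hr "A"]
  apply List.map_congr_left; intro i _
  apply List.map_congr_left; intro j _
  simp only [pvC2]

lemma pv_coords_eq (radius center_x center_y : Int) (hr : 0 ≤ radius) :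
    omA_coords center_x center_y (pvMap2 radius (pvC2 radius))
      = pvMap2 radius (pvP radius center_x center_y) := by
  have hn : (0:Int) < 2 * radius + 1 := by omega
  have hfd : PySem.Int.floordiv (2 * radius + 1) 2 = radius := by
    rw [PySem.Int.floordiv_eq_ediv_of_pos (by omega)]; omega
  unfold omA_coords pvMap2
  simp only [List.length_map, PySem.List.length_pyRange_one,
    pv_head_map _ _ hn, List.length_map, PySem.List.length_pyRange_one, pv_len_cast radius hr, hfd]
  apply List.map_congr_left
  intro i hi
  rw [PySem.List.mem_pyRange_one] at hi
  rw [PySem.List.foldl_congr_mem _ _ (fun row j => row ++ [pvP radius center_x center_y i j]) []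
    (by
      intro acc j hj
      rw [PySem.List.mem_pyRange_one] at hj
      rw [pv_get2 (fun i j => pvC2 radius i j) _ i j _ _ hi.1 hi.2 hj.1 hj.2]
      by_cases h0 : pvC2 radius i j = "0"
      · simp [h0, pvP]
      · have hAX : pvC2 radius i j = "A" ∨ pvC2 radius i j = "X" := by
          unfold pvC2 pvC at h0 ⊢; split_ifs at h0 ⊢ <;> simp_all
        rcases hAX with h | h <;> simp [h, pvP])]
  rw [PySem.List.foldl_append_singleton_eq_map]
  simp

lemma pv_values_eq (grid : List (List String)) (radius center_x center_y : Int) (hr : 0 ≤ radius) :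
    omA_values grid (pvMap2 radius (pvP radius center_x center_y))
      = observation_matrix_alt grid radius center_x center_y := by
  have hn : (0:Int) < 2 * radius + 1 := by omega
  unfold omA_values pvMap2
  simp only [observation_matrix_alt, List.length_map, PySem.List.length_pyRange_one,
    pv_head_map _ _ hn, List.length_map, PySem.List.length_pyRange_one, pv_len_cast radius hr]
  apply List.map_congr_left
  intro i hi
  rw [PySem.List.mem_pyRange_one] at hi
  apply List.map_congr_left
  intro j hj
  rw [PySem.List.mem_pyRange_one] at hj
  rw [pv_get2 (fun i j => pvP radius center_x center_y i j) _ i j _ _ hi.1 hi.2 hj.1 hj.2]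
  by_cases hc : i = radius ∧ j = radius
  · simp [pvP, pvC2, hc]
  · by_cases hx : 100 * radius < pyRoundSqrt100 ((i - radius) ^ 2 + (j - radius) ^ 2)
    · simp [pvP, pvC2, pvC, pvK, hc, hx]
    · have hle : pyRoundSqrt100 ((i - radius) ^ 2 + (j - radius) ^ 2) ≤ 100 * radius := not_lt.mp hx
      simp [pvP, pvC2, pvC, pvK, hc, hle]

theorem observation_matrix_main (grid : List (List String)) (radius : Int) (center_x : Int) (center_y : Int)
    (hr : 0 ≤ radius) :
    observation_matrix grid radius center_x center_y = observation_matrix_alt grid radius center_x center_y := by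
  have h1 : omA_matrix radius = pvMap2 radius (pvK radius) := rfl
  simp only [observation_matrix, h1]
  rw [show omA_cells radius (pvMap2 radius (pvK radius)) = pvMap2 radius (pvC radius) from
        pv_cells_eq radius hr,
      pv_cells2_eq radius hr, pv_coords_eq radius center_x center_y hr,
      pv_values_eq grid radius center_x center_y hr]

-- ===== VERDICT (by name: the statement is the Claim_ definition above) =====
theorem observation_matrix_spec : Claim_equal_observation_matrix := by
  intro grid radius cx cy _ hPre
  exact observation_matrix_main grid radius cx cy hPre.1
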